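-- pv_equiv track=rewrite | github.com/ravitharan/software_training | Projects/cupboard/couner_top_sink_splash.py | get_countertop_details
-- ===== SOURCE A (Python) =====
-- def get_countertop_details(counter_tops, sizes, colors):
--
--     details = {}
--
--     for item in counter_tops:
--         if (item[0] in details) and (item[1] in details[item[0]]):
--             details[item[0]][item[1]] += 1
--         else:
--             if item[0] not in details:
--                 details[item[0]] = {}
--             details[item[0]][item[1]] = 1
--
--     return details
-- ===== SOURCE B (Python) =====
-- def get_countertop_details(counter_tops, sizes, colors):
--     # Phase 1: one flat count table keyed on the (top, variant) pair.
--     flat = {}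
--     for item in counter_tops:
--         key = (item[0], item[1])
--         flat[key] = flat.get(key, 0) + 1
--     # Phase 2: regroup the flat table into the nested dict.
--     details = {}
--     for (a, b), c in flat.items():
--         details.setdefault(a, {})[b] = c
--     return details
-- ===== Notes on version B (the rewrite author's own statement) =====
-- stated objective: idiomatic
-- what changed: A builds the nested dict in one pass with in-place nested increments and membership tests; B first builds a flat count table keyed on the (top, variant) pair, then regroups that table into the nested dict in a separate pass.
import Mathlib
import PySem

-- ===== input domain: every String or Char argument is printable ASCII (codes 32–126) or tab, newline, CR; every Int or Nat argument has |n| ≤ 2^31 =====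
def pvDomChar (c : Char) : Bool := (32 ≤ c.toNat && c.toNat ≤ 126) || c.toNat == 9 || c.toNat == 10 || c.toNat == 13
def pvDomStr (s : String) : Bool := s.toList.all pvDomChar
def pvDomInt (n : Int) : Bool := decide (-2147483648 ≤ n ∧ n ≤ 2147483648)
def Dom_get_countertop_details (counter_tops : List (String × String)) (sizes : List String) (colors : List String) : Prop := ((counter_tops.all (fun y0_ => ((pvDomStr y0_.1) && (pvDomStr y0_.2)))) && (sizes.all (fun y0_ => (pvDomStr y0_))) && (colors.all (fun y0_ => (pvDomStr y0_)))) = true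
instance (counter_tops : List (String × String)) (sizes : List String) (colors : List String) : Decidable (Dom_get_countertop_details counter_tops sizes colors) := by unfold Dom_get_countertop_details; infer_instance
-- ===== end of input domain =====

-- B replaces A's single-pass in-place nested counting with a flat pair-count table built first and
-- regrouped into the nested dict in a second pass (same cost; a different, two-phase decomposition).


-- ===== PORT A =====
-- one loop body of A: nested membership test, then in-place increment / fresh nested entry
def pvStepA (d : PySem.Dict String (PySem.Dict String Int)) (item : String × String) :
    PySem.Dict String (PySem.Dict String Int) :=
  if d.contains item.1 && (d.getD item.1 PySem.Dict.empty).contains item.2 then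
    d.insert item.1 ((d.getD item.1 PySem.Dict.empty).insert item.2
      ((d.getD item.1 PySem.Dict.empty).getD item.2 0 + 1))
  else
    let d' := if d.contains item.1 then d else d.insert item.1 PySem.Dict.empty
    d'.insert item.1 ((d'.getD item.1 PySem.Dict.empty).insert item.2 1)

def get_countertop_details (counter_tops : List (String × String)) (sizes : List String) (colors : List String) : List (String × List (String × Int)) :=
  ((counter_tops.foldl pvStepA PySem.Dict.empty).items).map (fun p => (p.1, p.2.items))

-- ===== PORT B =====
-- phase 2 loop body of B: details.setdefault(a, {})[b] = c
def pvStepB (d : PySem.Dict String (PySem.Dict String Int)) (p : (String × String) × Int) :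
    PySem.Dict String (PySem.Dict String Int) :=
  let d1 := d.setdefault p.1.1 PySem.Dict.empty
  d1.insert p.1.1 ((d1.getD p.1.1 PySem.Dict.empty).insert p.1.2 p.2)

-- phase 1 of B: the flat count table keyed on the (top, variant) pair
def pvFlat (counter_tops : List (String × String)) : PySem.Dict (String × String) Int :=
  counter_tops.foldl (fun f item => f.insert (item.1, item.2) (f.getD (item.1, item.2) 0 + 1)) PySem.Dict.empty

def get_countertop_details_alt (counter_tops : List (String × String)) (sizes : List String) (colors : List String) : List (String × List (String × Int)) :=
  -- phase 2: regroup the flat table into the nested dict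
  (((pvFlat counter_tops).items.foldl pvStepB PySem.Dict.empty).items).map (fun p => (p.1, p.2.items))

-- ===== PRECONDITION & SPEC =====
def Spec_get_countertop_details (counter_tops : List (String × String)) (sizes : List String) (colors : List String) (out : List (String × List (String × Int))) : Prop := out = get_countertop_details_alt counter_tops sizes colors
instance (counter_tops : List (String × String)) (sizes : List String) (colors : List String) (out : List (String × List (String × Int))) : Decidable (Spec_get_countertop_details counter_tops sizes colors out) := by unfold Spec_get_countertop_details; infer_instance

-- ===== CLAIM (what is proved, stated in full; the proofs are below) =====
def Claim_equal_get_countertop_details : Prop := ∀ (counter_tops : List (String × String)) (sizes : List String) (colors : List String), Dom_get_countertop_details counter_tops sizes colors → Spec_get_countertop_details counter_tops sizes colors (get_countertop_details counter_tops sizes colors)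

-- ===== LEMMAS AND PROOFS =====

def pvSfst (xs : List (String × String)) : List String := PySem.Set.ofList (xs.map (·.1))
def pvInnerSet (xs : List (String × String)) (a : String) : List String :=
  PySem.Set.ofList ((xs.filter (fun p => p.1 == a)).map (·.2))
def pvInner (xs : List (String × String)) (a : String) : List (String × Int) :=
  (pvInnerSet xs a).map (fun b => (b, (xs.count (a, b) : Int)))
def pvCanon (xs : List (String × String)) : List (String × PySem.Dict String Int) :=
  (pvSfst xs).map (fun a => (a, PySem.Dict.mk (pvInner xs a)))

-- generic facts about a dict whose items are a map over a Nodup key list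
theorem pvKeys_mk_map {κ ν : Type} [BEq κ] (S : List κ) (g : κ → ν) :
    (PySem.Dict.mk (S.map (fun a => (a, g a)))).keys = S := by
  show List.map _ _ = S
  rw [List.map_map]
  exact List.map_id'' (fun _ => rfl) _

theorem pvContains_mk_map {κ ν : Type} [BEq κ] [LawfulBEq κ] [DecidableEq κ]
    (S : List κ) (g : κ → ν) (a : κ) :
    (PySem.Dict.mk (S.map (fun a => (a, g a)))).contains a = decide (a ∈ S) := by
  rw [PySem.Dict.contains_eq_decide_mem_keys, pvKeys_mk_map]

theorem pvGetD_mk_map {κ ν : Type} [BEq κ] [LawfulBEq κ] (S : List κ) (hS : S.Nodup)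
    (g : κ → ν) (a : κ) (ha : a ∈ S) (d0 : ν) :
    (PySem.Dict.mk (S.map (fun a => (a, g a)))).getD a d0 = g a := by
  refine PySem.Dict.getD_of_mem_items _ (List.mem_map_of_mem (f := fun a => (a, g a)) ha) ?_ d0
  rw [show (PySem.Dict.mk (S.map (fun a => (a, g a)))).keys = S from pvKeys_mk_map S g]
  exact hS

theorem pvItems_insert_mk_map_mem {κ ν : Type} [BEq κ] [LawfulBEq κ] [DecidableEq κ]
    (S : List κ) (g : κ → ν) (a : κ) (ha : a ∈ S) (v : ν) :
    ((PySem.Dict.mk (S.map (fun a => (a, g a)))).insert a v).items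
      = S.map (fun a' => (a', if a' = a then v else g a')) := by
  rw [PySem.Dict.items_insert_of_contains _ v (by rw [pvContains_mk_map]; simpa using ha)]
  show List.map _ (List.map _ _) = _
  rw [List.map_map]
  refine List.map_congr_left (fun a' _ => ?_)
  by_cases h : a' = a <;> simp [h]

theorem pvItems_insert_mk_map_not_mem {κ ν : Type} [BEq κ] [LawfulBEq κ] [DecidableEq κ]
    (S : List κ) (g : κ → ν) (a : κ) (ha : a ∉ S) (v : ν) :
    ((PySem.Dict.mk (S.map (fun a => (a, g a)))).insert a v).items
      = S.map (fun a' => (a', g a')) ++ [(a, v)] := by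
  rw [PySem.Dict.items_insert_of_not_contains _ v (by rw [pvContains_mk_map]; simpa using ha)]

-- membership characterizations
theorem pvMem_sfst (xs : List (String × String)) (a : String) :
    a ∈ pvSfst xs ↔ a ∈ xs.map (·.1) := PySem.Set.mem_ofList _ _

theorem pvMem_innerSet (xs : List (String × String)) (a b : String) :
    b ∈ pvInnerSet xs a ↔ (a, b) ∈ xs := by
  rw [pvInnerSet, PySem.Set.mem_ofList, List.mem_map]
  constructor
  · rintro ⟨q, hq, rfl⟩
    have := List.mem_filter.mp hq
    have h1 : q.1 = a := eq_of_beq this.2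
    exact h1 ▸ (Prod.mk.eta ▸ this.1)
  · intro h
    exact ⟨(a, b), List.mem_filter.mpr ⟨h, by simp⟩, rfl⟩

-- snoc behaviour of the canonical pieces
theorem pvInner_snoc_ne (xs : List (String × String)) (a b a' : String) (h : a' ≠ a) :
    pvInner (xs ++ [(a, b)]) a' = pvInner xs a' := by
  have hfil : (xs ++ [(a, b)]).filter (fun p => p.1 == a') = xs.filter (fun p => p.1 == a') := by
    rw [List.filter_append]
    simp [h.symm]
  unfold pvInner pvInnerSet
  rw [hfil]
  refine List.map_congr_left (fun b' _ => ?_)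
  have : (xs ++ [(a, b)]).count (a', b') = xs.count (a', b') := by
    rw [List.count_append]
    simp [Ne.symm h]
  rw [this]

theorem pvInnerSet_snoc_self (xs : List (String × String)) (a b : String) :
    pvInnerSet (xs ++ [(a, b)]) a = PySem.Set.add (pvInnerSet xs a) b := by
  unfold pvInnerSet
  rw [List.filter_append, show List.filter (fun p => p.1 == a) [(a, b)] = [(a, b)] from by simp,
    List.map_append, List.map_singleton, PySem.Set.ofList_append_singleton]

theorem pvCount_snoc (xs : List (String × String)) (a b b' : String) :
    ((xs ++ [(a, b)]).count (a, b') : Int)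
      = (xs.count (a, b') : Int) + (if b' = b then 1 else 0) := by
  rw [List.count_append, List.count_singleton]
  by_cases h : b' = b
  · subst h; simp
  · have hb : ((a, b) == (a, b')) = false := by simp [Ne.symm h]
    rw [hb]; simp [h]

theorem pvFoldA (xs : List (String × String)) :
    xs.foldl pvStepA PySem.Dict.empty = PySem.Dict.mk (pvCanon xs) := by
  induction xs using List.reverseRecOn with
  | nil => rfl
  | append_singleton xs p ih =>
    obtain ⟨a, b⟩ := p
    rw [List.foldl_append, List.foldl_cons, List.foldl_nil, ih]
    have hnodS : (pvSfst xs).Nodup := PySem.Set.nodup_ofList _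
    have hnodI : (pvInnerSet xs a).Nodup := PySem.Set.nodup_ofList _
    have hsfst : pvSfst (xs ++ [(a, b)]) = PySem.Set.add (pvSfst xs) a := by
      unfold pvSfst
      rw [List.map_append, List.map_singleton, PySem.Set.ofList_append_singleton]
    by_cases ha : a ∈ pvSfst xs
    · have hcA : (PySem.Dict.mk (pvCanon xs)).contains a = true := by
        rw [pvCanon, pvContains_mk_map]; simpa using ha
      have hgA : (PySem.Dict.mk (pvCanon xs)).getD a PySem.Dict.empty
          = PySem.Dict.mk (pvInner xs a) := by
        rw [pvCanon]; exact pvGetD_mk_map _ hnodS _ a ha _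
      have hsame : PySem.Set.add (pvSfst xs) a = pvSfst xs := PySem.Set.add_of_mem ha
      by_cases hb : b ∈ pvInnerSet xs a
      · -- both keys present: in-place increment
        have hcB : (PySem.Dict.mk (pvInner xs a)).contains b = true := by
          rw [pvInner, pvContains_mk_map]; simpa using hb
        have hgB : (PySem.Dict.mk (pvInner xs a)).getD b 0 = (xs.count (a, b) : Int) := by
          rw [pvInner]; exact pvGetD_mk_map _ hnodI _ b hb _
        have hg : ((PySem.Dict.mk (pvCanon xs)).contains (a, b).1
            && ((PySem.Dict.mk (pvCanon xs)).getD (a, b).1 PySem.Dict.empty).contains (a, b).2)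
            = true := by
          show ((PySem.Dict.mk (pvCanon xs)).contains a
            && ((PySem.Dict.mk (pvCanon xs)).getD a PySem.Dict.empty).contains b) = true
          rw [hcA, hgA, hcB]; rfl
        rw [pvStepA, if_pos hg]
        show ((PySem.Dict.mk (pvCanon xs)).insert a
            (((PySem.Dict.mk (pvCanon xs)).getD a PySem.Dict.empty).insert b
              (((PySem.Dict.mk (pvCanon xs)).getD a PySem.Dict.empty).getD b 0 + 1)))
          = PySem.Dict.mk (pvCanon (xs ++ [(a, b)]))
        rw [hgA, hgB]
        apply PySem.Dict.ext
        simp only [pvCanon]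
        rw [hsfst, hsame, pvItems_insert_mk_map_mem _ _ a ha]
        refine List.map_congr_left (fun a' ha' => ?_)
        by_cases haa : a' = a
        · subst haa
          rw [if_pos rfl]
          congr 1
          apply PySem.Dict.ext
          simp only [pvInner]
          rw [pvItems_insert_mk_map_mem _ _ b hb, pvInnerSet_snoc_self,
            PySem.Set.add_of_mem hb]
          refine List.map_congr_left (fun b' hb' => ?_)
          by_cases hbb : b' = b
          · subst hbb
            rw [if_pos rfl, pvCount_snoc, if_pos rfl]
          · rw [if_neg hbb, pvCount_snoc, if_neg hbb, add_zero]
        · rw [if_neg haa, pvInner_snoc_ne xs a b a' haa]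
      · -- outer key present, inner key fresh: append (b, 1) to the inner dict
        have hcB : (PySem.Dict.mk (pvInner xs a)).contains b = false := by
          rw [pvInner, pvContains_mk_map]; simpa using hb
        have hcnt0 : xs.count (a, b) = 0 :=
          List.count_eq_zero.mpr (fun h => hb ((pvMem_innerSet xs a b).mpr h))
        have hg : ¬ (((PySem.Dict.mk (pvCanon xs)).contains (a, b).1
            && ((PySem.Dict.mk (pvCanon xs)).getD (a, b).1 PySem.Dict.empty).contains (a, b).2)
            = true) := by
          show ¬ (((PySem.Dict.mk (pvCanon xs)).contains a
            && ((PySem.Dict.mk (pvCanon xs)).getD a PySem.Dict.empty).contains b) = true)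
          rw [hcA, hgA, hcB]; exact (by simp)
        rw [pvStepA, if_neg hg]
        show ((if (PySem.Dict.mk (pvCanon xs)).contains a then PySem.Dict.mk (pvCanon xs)
              else (PySem.Dict.mk (pvCanon xs)).insert a PySem.Dict.empty).insert a
            (((if (PySem.Dict.mk (pvCanon xs)).contains a then PySem.Dict.mk (pvCanon xs)
              else (PySem.Dict.mk (pvCanon xs)).insert a PySem.Dict.empty).getD a
                PySem.Dict.empty).insert b 1))
          = PySem.Dict.mk (pvCanon (xs ++ [(a, b)]))
        rw [if_pos (by rw [hcA] : (PySem.Dict.mk (pvCanon xs)).contains a = true), hgA]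
        apply PySem.Dict.ext
        simp only [pvCanon]
        rw [hsfst, hsame, pvItems_insert_mk_map_mem _ _ a ha]
        refine List.map_congr_left (fun a' ha' => ?_)
        by_cases haa : a' = a
        · subst haa
          rw [if_pos rfl]
          congr 1
          apply PySem.Dict.ext
          rw [show ((PySem.Dict.mk (pvInner xs a')).insert b (1 : Int)).items
              = pvInner xs a' ++ [(b, 1)] from by
            simp only [pvInner]
            rw [pvItems_insert_mk_map_not_mem _ _ b (by simpa using hb)]]
          simp only [pvInner]
          rw [pvInnerSet_snoc_self, PySem.Set.add_of_not_mem hb, List.map_append,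
            List.map_singleton]
          congr 1
          · refine List.map_congr_left (fun b' hb' => ?_)
            rw [pvCount_snoc, if_neg (fun (h : b' = b) => hb (h ▸ hb')), add_zero]
          · rw [pvCount_snoc, if_pos rfl, hcnt0]
            norm_num
        · rw [if_neg haa, pvInner_snoc_ne xs a b a' haa]
    · -- outer key fresh: append a fresh singleton inner dict
      have hcA : (PySem.Dict.mk (pvCanon xs)).contains a = false := by
        rw [pvCanon, pvContains_mk_map]; simpa using ha
      have hnotxs : (a, b) ∉ xs := fun h =>
        ha ((pvMem_sfst xs a).mpr (List.mem_map_of_mem (f := (·.1)) h))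
      have hcnt0 : xs.count (a, b) = 0 := List.count_eq_zero.mpr hnotxs
      have hfilnil : xs.filter (fun p => p.1 == a) = [] := by
        refine List.filter_eq_nil_iff.mpr (fun q hq hqa => ?_)
        exact ha ((pvMem_sfst xs a).mpr (List.mem_map.mpr ⟨q, hq, eq_of_beq hqa⟩))
      have hg : ¬ (((PySem.Dict.mk (pvCanon xs)).contains (a, b).1
          && ((PySem.Dict.mk (pvCanon xs)).getD (a, b).1 PySem.Dict.empty).contains (a, b).2)
          = true) := by
        show ¬ (((PySem.Dict.mk (pvCanon xs)).contains a
          && ((PySem.Dict.mk (pvCanon xs)).getD a PySem.Dict.empty).contains b) = true)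
        rw [hcA, Bool.false_and]; exact (by simp)
      rw [pvStepA, if_neg hg]
      show ((if (PySem.Dict.mk (pvCanon xs)).contains a then PySem.Dict.mk (pvCanon xs)
            else (PySem.Dict.mk (pvCanon xs)).insert a PySem.Dict.empty).insert a
          (((if (PySem.Dict.mk (pvCanon xs)).contains a then PySem.Dict.mk (pvCanon xs)
            else (PySem.Dict.mk (pvCanon xs)).insert a PySem.Dict.empty).getD a
              PySem.Dict.empty).insert b 1))
        = PySem.Dict.mk (pvCanon (xs ++ [(a, b)]))
      rw [if_neg (by rw [hcA]; exact (by simp) : ¬ ((PySem.Dict.mk (pvCanon xs)).contains a = true)),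
        PySem.Dict.getD_insert_self]
      apply PySem.Dict.ext
      rw [PySem.Dict.items_insert_of_contains _ _ (PySem.Dict.contains_insert_self _ _ _),
        PySem.Dict.items_insert_of_not_contains _ _ hcA, List.map_append]
      simp only [pvCanon]
      rw [hsfst, PySem.Set.add_of_not_mem ha, List.map_append, List.map_singleton,
        List.map_singleton]
      congr 1
      · rw [List.map_map]
        refine List.map_congr_left (fun a' ha' => ?_)
        have haa : a' ≠ a := fun h => ha (h ▸ ha')
        simp only [Function.comp]
        rw [show ((a', PySem.Dict.mk (pvInner xs a')).1 == a) = false from by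
          simpa using haa]
        rw [if_neg Bool.false_ne_true, pvInner_snoc_ne xs a b a' haa]
      · rw [show ((a, (PySem.Dict.empty : PySem.Dict String (PySem.Dict String Int))).1 == a) = true from by simp]
        simp only [if_pos]
        congr 1
        congr 1
        apply PySem.Dict.ext
        rw [PySem.Dict.items_insert_of_not_contains _ _ rfl]
        show [(b, (1 : Int))] = pvInner (xs ++ [(a, b)]) a
        simp only [pvInner]
        rw [pvInnerSet_snoc_self]
        simp only [pvInnerSet]
        rw [hfilnil]
        simp only [List.map_nil]
        rw [show PySem.Set.add (PySem.Set.ofList ([] : List String)) b = [b] from rfl,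
          List.map_singleton, pvCount_snoc, if_pos rfl, hcnt0]
        norm_num

def pvRgCanon (l : List ((String × String) × Int)) : List (String × PySem.Dict String Int) :=
  (PySem.Set.ofList (l.map (·.1.1))).map
    (fun a => (a, PySem.Dict.mk ((l.filter (fun p => p.1.1 == a)).map (fun p => (p.1.2, p.2)))))

theorem pvSetdefault_eq (d : PySem.Dict String (PySem.Dict String Int)) (k : String) (v) :
    d.setdefault k v = if d.contains k then d else d.insert k v := by
  unfold PySem.Dict.setdefault
  split_ifs with h
  · rfl
  · exact PySem.Dict.ext (by rw [PySem.Dict.items_insert_of_not_contains _ _ (by simpa using h)])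

theorem pvFoldB (l : List ((String × String) × Int)) (h : (l.map (·.1)).Nodup) :
    l.foldl pvStepB PySem.Dict.empty = PySem.Dict.mk (pvRgCanon l) := by
  induction l using List.reverseRecOn with
  | nil => rfl
  | append_singleton l q ih =>
    rw [List.map_append, List.map_singleton] at h
    obtain ⟨⟨a, b⟩, c⟩ := q
    simp only [List.nodup_append] at h
    have hnd : (l.map (·.1)).Nodup := h.1
    have hq : ((a, b) : String × String) ∉ l.map (·.1) := fun hm => h.2.2 _ hm (a, b) (by simp) rfl
    rw [List.foldl_append, List.foldl_cons, List.foldl_nil, ih hnd]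
    have hSnod : (PySem.Set.ofList (l.map (·.1.1))).Nodup := PySem.Set.nodup_ofList _
    have hbkey : b ∉ (l.filter (fun p => p.1.1 == a)).map (·.1.2) := by
      intro hm
      obtain ⟨p, hp, hpb⟩ := List.mem_map.mp hm
      have hpa : p.1.1 = a := eq_of_beq (List.mem_filter.mp hp).2
      exact hq (List.mem_map.mpr ⟨p, (List.mem_filter.mp hp).1,
        by rw [← hpa, ← hpb]⟩)
    have hcInner : (PySem.Dict.mk ((l.filter (fun p => p.1.1 == a)).map
        (fun p => (p.1.2, p.2)))).contains b = false := by
      rw [PySem.Dict.contains_eq_decide_mem_keys]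
      have : (PySem.Dict.mk ((l.filter (fun p => p.1.1 == a)).map
          (fun p => (p.1.2, p.2)))).keys = (l.filter (fun p => p.1.1 == a)).map (·.1.2) := by
        show List.map _ (List.map _ _) = _
        rw [List.map_map]; rfl
      rw [this]; simpa using hbkey
    have hfilq : ∀ a' : String, List.filter (fun p => p.1.1 == a') [((a, b), c)]
        = if a = a' then [((a, b), c)] else [] := by
      intro a'
      by_cases haa : a = a'
      · subst haa; simp
      · simp [haa]
    by_cases hmem : a ∈ PySem.Set.ofList (l.map (·.1.1))
    · have hcA : (PySem.Dict.mk (pvRgCanon l)).contains a = true := by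
        rw [pvRgCanon, pvContains_mk_map]; simpa using hmem
      have hgA : (PySem.Dict.mk (pvRgCanon l)).getD a PySem.Dict.empty
          = PySem.Dict.mk ((l.filter (fun p => p.1.1 == a)).map (fun p => (p.1.2, p.2))) := by
        rw [pvRgCanon]; exact pvGetD_mk_map _ hSnod _ a hmem _
      rw [pvStepB]
      show ((PySem.Dict.mk (pvRgCanon l)).setdefault a PySem.Dict.empty).insert a
          ((((PySem.Dict.mk (pvRgCanon l)).setdefault a PySem.Dict.empty).getD a
            PySem.Dict.empty).insert b c)
        = PySem.Dict.mk (pvRgCanon (l ++ [((a, b), c)]))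
      rw [pvSetdefault_eq, if_pos (by rw [hcA] : (PySem.Dict.mk (pvRgCanon l)).contains a = true), hgA]
      apply PySem.Dict.ext
      simp only [pvRgCanon]
      simp only [List.map_append, List.map_singleton]
      rw [PySem.Set.ofList_append_singleton,
        PySem.Set.add_of_mem (by simpa using hmem), pvItems_insert_mk_map_mem _ _ a hmem]
      refine List.map_congr_left (fun a' ha' => ?_)
      by_cases haa : a' = a
      · subst haa
        rw [if_pos rfl]
        congr 1
        apply PySem.Dict.ext
        rw [PySem.Dict.items_insert_of_not_contains _ _ hcInner,
          List.filter_append, hfilq, if_pos rfl, List.map_append, List.map_singleton]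
      · rw [if_neg haa, List.filter_append, hfilq, if_neg (fun hh => haa hh.symm),
          List.append_nil]
    · have hcA : (PySem.Dict.mk (pvRgCanon l)).contains a = false := by
        rw [pvRgCanon, pvContains_mk_map]; simpa using hmem
      have hfilnil : l.filter (fun p => p.1.1 == a) = [] := by
        refine List.filter_eq_nil_iff.mpr (fun p hp hpa => ?_)
        exact hmem (PySem.Set.mem_ofList _ _ |>.mpr
          (List.mem_map.mpr ⟨p, hp, eq_of_beq hpa⟩))
      rw [pvStepB]
      show ((PySem.Dict.mk (pvRgCanon l)).setdefault a PySem.Dict.empty).insert a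
          ((((PySem.Dict.mk (pvRgCanon l)).setdefault a PySem.Dict.empty).getD a
            PySem.Dict.empty).insert b c)
        = PySem.Dict.mk (pvRgCanon (l ++ [((a, b), c)]))
      rw [pvSetdefault_eq,
        if_neg (by rw [hcA]; exact (by simp) : ¬ ((PySem.Dict.mk (pvRgCanon l)).contains a = true)),
        PySem.Dict.getD_insert_self]
      apply PySem.Dict.ext
      rw [PySem.Dict.items_insert_of_contains _ _ (PySem.Dict.contains_insert_self _ _ _),
        PySem.Dict.items_insert_of_not_contains _ _ hcA, List.map_append]
      simp only [pvRgCanon]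
      simp only [List.map_append, List.map_singleton]
      rw [PySem.Set.ofList_append_singleton,
        PySem.Set.add_of_not_mem (by simpa using hmem)]
      simp only [List.map_append, List.map_singleton]
      congr 1
      · rw [List.map_map]
        refine List.map_congr_left (fun a' ha' => ?_)
        have haa : a' ≠ a := fun hh => hmem (by simpa using (hh ▸ ha' : a ∈ PySem.Set.ofList (l.map (·.1.1))))
        simp only [Function.comp]
        rw [show ((a', PySem.Dict.mk ((l.filter (fun p => p.1.1 == a')).map
            (fun p => (p.1.2, p.2)))).1 == a) = false from by simpa using haa,
          if_neg Bool.false_ne_true, List.filter_append, hfilq,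
          if_neg (fun hh => haa hh.symm), List.append_nil]
      · rw [show ((a, (PySem.Dict.empty : PySem.Dict String (PySem.Dict String Int))).1 == a)
            = true from by simp]
        simp only [if_pos]
        congr 2
        apply PySem.Dict.ext
        rw [PySem.Dict.items_insert_of_not_contains _ _ rfl, List.filter_append, hfilnil,
          hfilq, if_pos rfl]
        rfl

theorem pvOfList_map_ofList {α β : Type} [BEq α] [LawfulBEq α] [BEq β] [LawfulBEq β] (f : α → β) (xs : List α) :
    PySem.Set.ofList ((PySem.Set.ofList xs).map f) = PySem.Set.ofList (xs.map f) := by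
  induction xs using List.reverseRecOn with
  | nil => rfl
  | append_singleton xs x ih =>
    rw [PySem.Set.ofList_append_singleton, List.map_append, List.map_singleton,
      PySem.Set.ofList_append_singleton, ← ih]
    by_cases hx : x ∈ PySem.Set.ofList xs
    · rw [PySem.Set.add_of_mem hx, PySem.Set.add_of_mem]
      rw [PySem.Set.mem_ofList]
      exact List.mem_map_of_mem hx
    · rw [PySem.Set.add_of_not_mem hx, List.map_append, List.map_singleton,
        PySem.Set.ofList_append_singleton]

theorem pvFilter_ofList {α : Type} [BEq α] [LawfulBEq α] (p : α → Bool) (xs : List α) :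
    (PySem.Set.ofList xs).filter p = PySem.Set.ofList (xs.filter p) := by
  induction xs using List.reverseRecOn with
  | nil => rfl
  | append_singleton xs x ih =>
    rw [PySem.Set.ofList_append_singleton, List.filter_append]
    by_cases hp : p x
    · have hsing : List.filter p [x] = [x] := by simp [hp]
      rw [hsing, PySem.Set.ofList_append_singleton, ← ih]
      by_cases hx : x ∈ PySem.Set.ofList xs
      · rw [PySem.Set.add_of_mem hx, PySem.Set.add_of_mem
          (List.mem_filter.mpr ⟨hx, hp⟩)]
      · rw [PySem.Set.add_of_not_mem hx, PySem.Set.add_of_not_mem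
          (fun h => hx (List.mem_filter.mp h).1), List.filter_append, hsing]
    · have hsing : List.filter p [x] = [] := by simp [hp]
      rw [hsing, List.append_nil, ← ih]
      by_cases hx : x ∈ PySem.Set.ofList xs
      · rw [PySem.Set.add_of_mem hx]
      · rw [PySem.Set.add_of_not_mem hx, List.filter_append, hsing, List.append_nil]

theorem pvOfList_map_inj {α β : Type} [BEq α] [LawfulBEq α] [BEq β] [LawfulBEq β] (f : α → β)
    (hf : Function.Injective f) (xs : List α) :
    PySem.Set.ofList (xs.map f) = (PySem.Set.ofList xs).map f := by
  induction xs using List.reverseRecOn with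
  | nil => rfl
  | append_singleton xs x ih =>
    rw [List.map_append, List.map_singleton, PySem.Set.ofList_append_singleton,
      PySem.Set.ofList_append_singleton, ih]
    by_cases hx : x ∈ PySem.Set.ofList xs
    · rw [PySem.Set.add_of_mem hx, PySem.Set.add_of_mem (List.mem_map_of_mem hx)]
    · rw [PySem.Set.add_of_not_mem hx, PySem.Set.add_of_not_mem (by
        intro h
        obtain ⟨y, hy, hyx⟩ := List.mem_map.mp h
        exact hx (hf hyx ▸ hy)), List.map_append, List.map_singleton]

theorem pvBridge (xs : List (String × String)) :
    pvRgCanon ((PySem.Set.ofList xs).map (fun k => (k, (xs.count k : Int)))) = pvCanon xs := by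
  unfold pvRgCanon pvCanon
  have houter : (((PySem.Set.ofList xs).map (fun k => (k, (xs.count k : Int)))).map (·.1.1)) = (PySem.Set.ofList xs).map (·.1) := by
    rw [List.map_map]; rfl
  rw [houter, pvOfList_map_ofList]
  show List.map _ (pvSfst xs) = List.map _ (pvSfst xs)
  refine List.map_congr_left (fun a _ => ?_)
  have hfil : (((PySem.Set.ofList xs).map (fun k => (k, (xs.count k : Int)))).filter (fun p => p.1.1 == a))
      = ((PySem.Set.ofList xs).filter (fun k => k.1 == a)).map (fun k => (k, (xs.count k : Int))) := by
    rw [List.filter_map]; rfl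
  rw [hfil, pvFilter_ofList]
  have h1 : ((xs.filter (fun k => k.1 == a)).map (fun k => ((a : String), k.2)))
      = xs.filter (fun k => k.1 == a) := by
    refine (List.map_congr_left fun k hk => ?_).trans (List.map_id'' (fun _ => rfl) _)
    have hk1 : k.1 = a := by
      have := (List.mem_filter.mp hk).2
      exact eq_of_beq this
    exact Prod.ext hk1.symm rfl
  have hys : PySem.Set.ofList (xs.filter (fun k => k.1 == a))
      = (pvInnerSet xs a).map (fun b => (a, b)) := by
    conv_lhs => rw [← h1]
    rw [show List.map (fun k : String × String => (a, k.2)) (xs.filter (fun k => k.1 == a))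
        = ((xs.filter (fun k => k.1 == a)).map (·.2)).map (fun b => (a, b)) from by
      rw [List.map_map]; rfl]
    exact pvOfList_map_inj _ (fun b c h => (Prod.mk.injEq _ _ _ _ ▸ h : _ ∧ _).2) _
  rw [hys, List.map_map, List.map_map]
  show _ = (a, PySem.Dict.mk (pvInner xs a))
  unfold pvInner
  congr 1

-- ===== VERDICT (by name: the statement is the Claim_ definition above) =====
theorem get_countertop_details_spec : Claim_equal_get_countertop_details := by
  intro counter_tops sizes colors _
  unfold Spec_get_countertop_details get_countertop_details get_countertop_details_alt
  have hflat : pvFlat counter_tops = PySem.Dict.counter counter_tops := by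
    rw [pvFlat, ← PySem.Dict.foldl_insert_getD_add_one_eq_counter]
  rw [hflat, pvFoldA, PySem.Dict.items_counter,
    pvFoldB _ (by
      have : (((PySem.Set.ofList counter_tops).map (fun k => (k, (counter_tops.count k : Int)))).map (·.1))
          = PySem.Set.ofList counter_tops := by
        rw [List.map_map]; exact List.map_id'' (fun _ => rfl) _
      rw [this]; exact PySem.Set.nodup_ofList counter_tops),
    pvBridge]
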